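-- pv_equiv track=rewrite | github.com/zzl0/aoc | 2020/day14.py | mask_addr
-- ===== SOURCE A (Python) =====
-- def mask_addr(mask, addr):
--     def dfs(addr_str):
--         if addr_str:
--             first, rest = addr_str[0], addr_str[1:]
--             rest_rs = dfs(rest)
--             options = (first,) if first != 'X' else ('0', '1')
--             return [a + b for a in options for b in rest_rs]
--         return ['']
--
--     bin_str = f'{addr:036b}'
--     addr_str = [m if m != '0' else b for b, m in zip(bin_str, mask)]
--     return [int(n, 2) for n in dfs(addr_str)]
-- ===== SOURCE B (Python) =====
-- def mask_addr(mask, addr):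
--     # One linear pass over zip(bits, mask) accumulates the base value
--     # (bit = mask bit, or the address bit where the mask is '0'; 'X' counts 0)
--     # and the bit-weights of the X positions; then each weight doubles the
--     # result list (choice 0 before choice 1, leftmost X varying slowest).
--     bits = format(addr, '036b')
--     base = 0
--     weights = []
--     for b, m in zip(bits, mask):
--         weights = [2 * w for w in weights]
--         if m == 'X':
--             weights.append(1)
--             bit = 0
--         elif m == '1':
--             bit = 1
--         elif m == '0':
--             bit = 1 if b == '1' else 0
--         else:
--             raise ValueError('bad mask character: ' + repr(m))
--         base = 2 * base + bit
--     results = [base]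
--     for w in weights:
--         results = [x for r in results for x in (r, r + w)]
--     return results
-- ===== Notes on version B (the rewrite author's own statement) =====
-- stated objective: alternative
-- what changed: Replaces the recursive string-building DFS plus per-result int(n,2) parsing with one arithmetic pass that accumulates a base integer and the X-position bit-weights (validating mask characters), then doubles the result list once per weight (no strings, no recursion).
-- intended difference: On negative addr with a mask starting with '0' (excluding the degenerate all-'0'-mask case where every expansion is 0 and both return [0]), A keeps the '-' sign character of f'{addr:036b}' in its strings and returns the negated expansions (e.g. [0, -1]); B reads the sign position as a non-set bit and returns the nonnegative expansions ([0, 1]), the intended values for a routine that ORs mask bits onto a 36-bit address. — e.g. on mask_addr("0X", -1): A returns [0, -1], B returns [0, 1]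
-- outside the precondition, e.g. on mask_addr('1_1', 0): A returns [3], B raises ValueError
import Mathlib
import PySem

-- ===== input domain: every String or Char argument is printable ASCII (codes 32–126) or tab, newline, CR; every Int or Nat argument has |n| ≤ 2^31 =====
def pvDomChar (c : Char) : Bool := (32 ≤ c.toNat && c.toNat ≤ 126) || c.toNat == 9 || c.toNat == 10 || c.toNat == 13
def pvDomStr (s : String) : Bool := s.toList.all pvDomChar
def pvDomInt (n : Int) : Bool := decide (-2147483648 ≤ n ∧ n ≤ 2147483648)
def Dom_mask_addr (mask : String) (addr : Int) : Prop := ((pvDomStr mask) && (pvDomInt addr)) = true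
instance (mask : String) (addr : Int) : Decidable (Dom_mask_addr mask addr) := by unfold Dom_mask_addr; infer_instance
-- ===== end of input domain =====

-- B replaces the string-building DFS + int(n,2) parsing of A by one arithmetic pass
-- (base value + X bit-weights) followed by iterative doubling of the result list.
-- On negative addresses with a leading '0' mask bit (D_ below) A threads the '-' sign
-- character of f'{addr:036b}' through its strings and negates the results; B treats it
-- as a non-set bit, the natural reading for a bit-masking routine.


-- ===== PORT A =====
-- binary digits of a natural number, most significant first (no leading zeros; [] for 0);
-- structural recursion on a fuel argument (fuel n suffices: the bit length of n is ≤ n)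
def pvBinDigitsF : Nat → Nat → List Char
  | _, 0 => []
  | 0, _+1 => []
  | f+1, n+1 => pvBinDigitsF f ((n+1)/2) ++ [if (n+1) % 2 == 1 then '1' else '0']

def pvBinDigits (n : Nat) : List Char := pvBinDigitsF n n

def pvBinStr (n : Nat) : List Char := if n = 0 then ['0'] else pvBinDigits n

-- f'{addr:036b}': zero-padded to total width 36, sign first for negatives (as CPython)
def pvFmt36 (addr : Int) : List Char :=
  if addr < 0 then
    let s := pvBinStr (-addr).toNat
    '-' :: (List.replicate (35 - s.length) '0' ++ s)
  else
    let s := pvBinStr addr.toNat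
    List.replicate (36 - s.length) '0' ++ s

-- int(n, 2): exact on the strings reached under Pre_ (nonempty, optional '-' sign,
-- then binary digits); none models ValueError elsewhere
def pvBinVal? (cs : List Char) : Option Int :=
  if !cs.isEmpty && cs.all (fun c => c == '0' || c == '1')
  then some (cs.foldl (fun a c => 2*a + (if c = '1' then 1 else 0)) 0)
  else none

def pvIntBin? (cs : List Char) : Option Int :=
  match cs with
  | c :: rest => if c = '-' then (pvBinVal? rest).map (fun v => -v) else pvBinVal? (c :: rest)
  | [] => pvBinVal? []

def pvDfs : List Char → List (List Char)
  | [] => [[]]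
  | first :: rest =>
    let rest_rs := pvDfs rest
    let options := if first ≠ 'X' then [first] else ['0', '1']
    options.flatMap (fun a => rest_rs.map (fun b => a :: b))

def mask_addr (mask : String) (addr : Int) : List Int :=
  let bin_str := pvFmt36 addr
  let addr_str := (bin_str.zip mask.toList).map (fun bm => if bm.2 ≠ '0' then bm.2 else bm.1)
  -- int(n, 2); .getD 0 is unreachable under Pre_ (Python would raise ValueError there)
  (pvDfs addr_str).map (fun n => (pvIntBin? n).getD 0)

-- ===== PORT B =====
-- the ValueError branch of Source B (mask char outside '0'/'1'/'X') is unreachable under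
-- Pre_; the port computes bit 0 there
def mask_addr_alt (mask : String) (addr : Int) : List Int :=
  let bits := pvFmt36 addr
  let bw := (bits.zip mask.toList).foldl
    (fun (acc : Int × List Int) bm =>
      if bm.2 = 'X' then
        (2 * acc.1, acc.2.map (fun w => 2 * w) ++ [1])
      else
        (2 * acc.1 +
           (if bm.2 = '1' then 1 else if bm.2 = '0' then (if bm.1 = '1' then 1 else 0) else 0),
         acc.2.map (fun w => 2 * w)))
    (0, [])
  bw.2.foldl (fun rs w => rs.flatMap (fun r => [r, r + w])) [bw.1]

-- ===== PRECONDITION & SPEC =====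
-- Pre_ = the inputs on which A returns normally: a nonempty mask whose used (first 36)
-- characters are '0'/'1'/'X' (other characters make every int(n,2) raise ValueError,
-- except int-literal quirks like '_' which Pre_ conservatively also excludes), and not
-- (mask = "0" with addr < 0), where A calls int('-', 2) and raises ValueError.
def Pre_mask_addr (mask : String) (addr : Int) : Prop :=
  mask ≠ "" ∧
    ((mask.toList.take 36).all (fun c => c == '0' || c == '1' || c == 'X')) = true ∧
    ¬(addr < 0 ∧ mask = "0")
instance (mask : String) (addr : Int) : Decidable (Pre_mask_addr mask addr) := by
  unfold Pre_mask_addr; infer_instance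

def pvWitness_mask_addr : String × Int := ("X1X", 5)

-- On addr < 0 with the mask starting with '0' (except the degenerate all-'0'-mask case
-- where every expansion is 0 and both return [0]), A keeps the '-' sign character of
-- f'{addr:036b}' in its strings and returns the NEGATED expansions; B reads the sign
-- position as a non-set bit and returns the nonnegative expansions, the intended
-- values for a routine that ORs mask bits onto a 36-bit address.
def D_mask_addr (mask : String) (addr : Int) : Prop :=
  addr < 0 ∧ mask.toList.take 1 = ['0'] ∧
    ¬(((mask.toList.take 36).all (fun c => c == '0')) = true ∧
      -addr < 2^(36 - min 36 mask.toList.length))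
instance (mask : String) (addr : Int) : Decidable (D_mask_addr mask addr) := by
  unfold D_mask_addr; infer_instance

def Spec_mask_addr (mask : String) (addr : Int) (out : List Int) : Prop := ¬ D_mask_addr mask addr → out = mask_addr_alt mask addr
instance (mask : String) (addr : Int) (out : List Int) : Decidable (Spec_mask_addr mask addr out) := by unfold Spec_mask_addr; infer_instance

def pvDiffWitness_mask_addr : String × Int := ("0X", -1)
def pvDiffWitnessOut_mask_addr : (List Int) × (List Int) := ([0, -1], [0, 1])

-- ===== CLAIM (what is proved, stated in full; the proofs are below) =====
def Claim_unchanged_mask_addr : Prop := ∀ (mask : String) (addr : Int), Dom_mask_addr mask addr → Pre_mask_addr mask addr → Spec_mask_addr mask addr (mask_addr mask addr)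
def Claim_exact_mask_addr : Prop := ∀ (mask : String) (addr : Int), Dom_mask_addr mask addr → Pre_mask_addr mask addr → D_mask_addr mask addr → mask_addr mask addr ≠ mask_addr_alt mask addr
def Claim_changed_mask_addr : Prop := Dom_mask_addr (pvDiffWitness_mask_addr.1) (pvDiffWitness_mask_addr.2) ∧ Pre_mask_addr (pvDiffWitness_mask_addr.1) (pvDiffWitness_mask_addr.2) ∧ D_mask_addr (pvDiffWitness_mask_addr.1) (pvDiffWitness_mask_addr.2) ∧ mask_addr (pvDiffWitness_mask_addr.1) (pvDiffWitness_mask_addr.2) = pvDiffWitnessOut_mask_addr.1 ∧ mask_addr_alt (pvDiffWitness_mask_addr.1) (pvDiffWitness_mask_addr.2) = pvDiffWitnessOut_mask_addr.2 ∧ pvDiffWitnessOut_mask_addr.1 ≠ pvDiffWitnessOut_mask_addr.2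

-- ===== LEMMAS AND PROOFS =====
-- substituted character at one position: mask char unless it is '0', else address bit
def pvSub (bm : Char × Char) : Char := if bm.2 ≠ '0' then bm.2 else bm.1

def pvD (c : Char) : Int := if c = '1' then 1 else 0

-- value of a binary digit string, continuing from accumulator a (same fold as int(n,2))
def pvValAcc (a : Int) (cs : List Char) : Int :=
  cs.foldl (fun a c => 2*a + (if c = '1' then 1 else 0)) a

-- the list of integers A's DFS denotes, computed arithmetically from the left
def pvE (a : Int) : List Char → List Int
  | [] => [a]
  | c :: cs => if c = 'X' then pvE (2*a) cs ++ pvE (2*a + 1) cs else pvE (2*a + pvD c) cs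

-- bit-weights of the X positions, left to right
def pvWts : List Char → List Int
  | [] => []
  | c :: cs => (if c = 'X' then [(2:Int)^cs.length] else []) ++ pvWts cs

def pvExpand (rs ws : List Int) : List Int :=
  ws.foldl (fun rs w => rs.flatMap (fun r => [r, r + w])) rs

theorem pvValAcc_cons (a : Int) (c : Char) (cs : List Char) :
    pvValAcc a (c :: cs) = pvValAcc (2*a + pvD c) cs := by
  simp [pvValAcc, pvD]

theorem pvValAcc_linear (cs : List Char) : ∀ a : Int,
    pvValAcc a cs = a * 2^cs.length + pvValAcc 0 cs := by
  induction cs with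
  | nil => intro a; simp [pvValAcc]
  | cons c cs ih =>
    intro a
    rw [pvValAcc_cons, pvValAcc_cons, ih, ih (2*0 + pvD c)]
    simp [List.length_cons, pow_succ]
    ring

theorem pvDfs_map (cs : List Char) : ∀ a : Int,
    (pvDfs cs).map (pvValAcc a) = pvE a cs := by
  induction cs with
  | nil => intro a; simp [pvDfs, pvE, pvValAcc]
  | cons c cs ih =>
    intro a
    have hcomp : ∀ d : Char, ((pvDfs cs).map (fun b => d :: b)).map (pvValAcc a)
        = (pvDfs cs).map (pvValAcc (2*a + pvD d)) := by
      intro d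
      rw [List.map_map]
      apply List.map_congr_left
      intro b _
      simp [Function.comp, pvValAcc_cons]
    by_cases hc : c = 'X'
    · subst hc
      rw [show pvDfs ('X' :: cs) = (pvDfs cs).map (fun b => '0' :: b) ++ (pvDfs cs).map (fun b => '1' :: b) from by simp [pvDfs]]
      rw [show pvE a ('X' :: cs) = pvE (2*a) cs ++ pvE (2*a + 1) cs from by simp [pvE]]
      rw [List.map_append, hcomp, hcomp, ih, ih,
        show pvD '0' = 0 from by decide, show pvD '1' = 1 from by decide, add_zero]
    · rw [show pvDfs (c :: cs) = (pvDfs cs).map (fun b => c :: b) from by simp [pvDfs, hc]]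
      rw [show pvE a (c :: cs) = pvE (2*a + pvD c) cs from by simp [pvE, hc]]
      rw [hcomp, ih]

theorem pvDfs_shape (cs : List Char) (hc : ∀ c ∈ cs, c = '0' ∨ c = '1' ∨ c = 'X') :
    ∀ s ∈ pvDfs cs, s.length = cs.length ∧ ∀ c ∈ s, c = '0' ∨ c = '1' := by
  induction cs with
  | nil => simp [pvDfs]
  | cons c cs ih =>
    intro s hs
    simp only [pvDfs, List.mem_flatMap, List.mem_map] at hs
    obtain ⟨a, ha, t, ht, rfl⟩ := hs
    have hab : a = '0' ∨ a = '1' := by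
      by_cases hx : c = 'X'
      · rw [if_neg (by simp [hx])] at ha
        simpa using ha
      · rw [if_pos hx] at ha
        simp at ha
        rcases hc c (by simp) with h | h | h
        · left; rw [ha, h]
        · right; rw [ha, h]
        · exact absurd h hx
    have hrest := ih (fun d hd => hc d (List.mem_cons_of_mem _ hd)) t ht
    refine ⟨by simp [hrest.1], ?_⟩
    intro d hd
    rcases List.mem_cons.1 hd with rfl | hd
    · exact hab
    · exact hrest.2 d hd

theorem pvIntBin_getD (s : List Char) (hne : s ≠ [])
    (hb : ∀ c ∈ s, c = '0' ∨ c = '1') :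
    (pvIntBin? s).getD 0 = pvValAcc 0 s := by
  match s, hne with
  | c :: rest, _ =>
    have hc : c = '0' ∨ c = '1' := hb c (by simp)
    have hcm : ¬ c = '-' := by rcases hc with rfl | rfl <;> decide
    have hcond : (!(c :: rest).isEmpty && (c :: rest).all (fun c => c == '0' || c == '1')) = true := by
      simp only [List.isEmpty_cons, Bool.not_false, Bool.true_and, List.all_eq_true,
        Bool.or_eq_true, beq_iff_eq]
      exact hb
    rw [pvIntBin?, if_neg hcm, pvBinVal?, if_pos hcond]
    rfl

theorem pvExpand_append (ws : List Int) : ∀ xs ys : List Int,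
    pvExpand (xs ++ ys) ws = pvExpand xs ws ++ pvExpand ys ws := by
  induction ws with
  | nil => intro xs ys; rfl
  | cons w ws ih =>
    intro xs ys
    simp only [pvExpand, List.foldl_cons, List.flatMap_append]
    exact ih _ _

theorem pvE_expand (cs : List Char) : ∀ a : Int,
    pvE a cs = pvExpand [pvValAcc a cs] (pvWts cs) := by
  induction cs with
  | nil => intro a; simp [pvE, pvWts, pvExpand, pvValAcc]
  | cons c cs ih =>
    intro a
    by_cases hc : c = 'X'
    · subst hc
      rw [show pvE a ('X' :: cs) = pvE (2*a) cs ++ pvE (2*a + 1) cs from by simp [pvE]]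
      rw [ih (2*a), ih (2*a + 1), ← pvExpand_append]
      rw [show pvWts ('X' :: cs) = (2:Int)^cs.length :: pvWts cs from by simp [pvWts]]
      rw [show pvValAcc a ('X' :: cs) = pvValAcc (2*a) cs from by
        rw [pvValAcc_cons, show pvD 'X' = 0 from by decide, add_zero]]
      have hstep : pvExpand [pvValAcc (2*a) cs] ((2:Int)^cs.length :: pvWts cs)
          = pvExpand [pvValAcc (2*a) cs, pvValAcc (2*a) cs + 2^cs.length] (pvWts cs) := by
        simp [pvExpand]
      have hv : pvValAcc (2*a) cs + 2^cs.length = pvValAcc (2*a + 1) cs := by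
        rw [pvValAcc_linear cs (2*a), pvValAcc_linear cs (2*a + 1)]
        ring
      rw [hstep, hv, List.singleton_append]
    · rw [show pvE a (c :: cs) = pvE (2*a + pvD c) cs from by simp [pvE, hc]]
      rw [ih, ← pvValAcc_cons]
      rw [show pvWts (c :: cs) = pvWts cs from by simp [pvWts, hc]]

theorem pvFoldB (ps : List (Char × Char)) : ∀ (a : Int) (ws : List Int),
    (∀ p ∈ ps, (p.2 = '0' → p.1 = '0' ∨ p.1 = '1') ∧ (p.2 = '0' ∨ p.2 = '1' ∨ p.2 = 'X')) →
    ps.foldl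
      (fun (acc : Int × List Int) bm =>
        if bm.2 = 'X' then
          (2 * acc.1, acc.2.map (fun w => 2 * w) ++ [1])
        else
          (2 * acc.1 +
             (if bm.2 = '1' then 1 else if bm.2 = '0' then (if bm.1 = '1' then 1 else 0) else 0),
           acc.2.map (fun w => 2 * w)))
      (a, ws)
    = (pvValAcc a (ps.map pvSub), ws.map (fun w => w * 2^ps.length) ++ pvWts (ps.map pvSub)) := by
  induction ps with
  | nil =>
    intro a ws _
    simp [pvValAcc, pvWts]
  | cons p ps ih =>
    intro a ws hmem
    obtain ⟨hp1, hp2⟩ := hmem p (by simp)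
    have hrest : ∀ q ∈ ps, (q.2 = '0' → q.1 = '0' ∨ q.1 = '1') ∧ (q.2 = '0' ∨ q.2 = '1' ∨ q.2 = 'X') :=
      fun q hq => hmem q (List.mem_cons_of_mem _ hq)
    have hmm : ∀ (l : Nat), ((ws.map (fun w => 2*w)).map (fun w => w * 2^l))
        = ws.map (fun w => w * 2^(l+1)) := by
      intro l
      rw [List.map_map]
      apply List.map_congr_left
      intro w _
      simp [Function.comp, pow_succ]
      ring
    rcases hp2 with h2 | h2 | h2
    · -- mask char '0': substituted char is the address bit
      rw [List.foldl_cons, if_neg (by rw [h2]; decide), ih _ _ hrest]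
      have hp1' : p.1 = '0' ∨ p.1 = '1' := hp1 h2
      have hsub : pvSub p = p.1 := by simp [pvSub, h2]
      have hbit : (if p.2 = '1' then (1:Int) else if p.2 = '0' then (if p.1 = '1' then 1 else 0) else 0) = pvD p.1 := by
        rcases hp1' with h1 | h1 <;> simp [h2, h1, pvD]
      rw [hbit]
      simp only [List.map_cons, hsub, pvValAcc_cons, List.length_cons, pvWts]
      rw [if_neg (by rcases hp1' with h1 | h1 <;> rw [h1] <;> decide), List.nil_append, hmm]
    · -- mask char '1'
      rw [List.foldl_cons, if_neg (by rw [h2]; decide), ih _ _ hrest]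
      have hsub : pvSub p = '1' := by simp [pvSub, h2]
      have hbit : (if p.2 = '1' then (1:Int) else if p.2 = '0' then (if p.1 = '1' then 1 else 0) else 0) = pvD '1' := by
        simp [h2, pvD]
      rw [hbit]
      simp only [List.map_cons, hsub, pvValAcc_cons, List.length_cons, pvWts]
      rw [if_neg (by decide), List.nil_append, hmm]
    · -- mask char 'X'
      rw [List.foldl_cons, if_pos h2, ih _ _ hrest]
      have hsub : pvSub p = 'X' := by simp [pvSub, h2]
      simp only [List.map_cons, hsub, pvValAcc_cons, List.length_cons]
      rw [show pvD 'X' = 0 from by decide, add_zero]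
      rw [List.map_append, hmm]
      simp [pvWts, List.append_assoc]

theorem pvBinDigitsF_chars : ∀ f n : Nat, ∀ c ∈ pvBinDigitsF f n, c = '0' ∨ c = '1' := by
  intro f
  induction f with
  | zero =>
    intro n c hc
    match n, hc with
    | 0, hc => simp [pvBinDigitsF] at hc
    | m+1, hc => simp [pvBinDigitsF] at hc
  | succ f ih =>
    intro n c hc
    match n, hc with
    | 0, hc => simp [pvBinDigitsF] at hc
    | m+1, hc =>
      rw [pvBinDigitsF] at hc
      rcases List.mem_append.1 hc with h | h
      · exact ih _ c h
      · simp only [List.mem_singleton] at h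
        subst h
        split <;> simp

theorem pvBinDigits_chars : ∀ n : Nat, ∀ c ∈ pvBinDigits n, c = '0' ∨ c = '1' :=
  fun n => pvBinDigitsF_chars n n

theorem pvFmt36_chars (addr : Int) (ha : 0 ≤ addr) :
    ∀ c ∈ pvFmt36 addr, c = '0' ∨ c = '1' := by
  intro c hc
  rw [pvFmt36, if_neg (by omega)] at hc
  rcases List.mem_append.1 hc with h | h
  · left; exact List.eq_of_mem_replicate h
  · rw [pvBinStr] at h
    split at h
    · simp at h; left; exact h
    · exact pvBinDigits_chars _ c h

theorem pvFmt36_tail_chars (addr : Int) :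
    ∀ c ∈ (pvFmt36 addr).tail, c = '0' ∨ c = '1' := by
  intro c hc
  by_cases ha : addr < 0
  · rw [pvFmt36, if_pos ha] at hc
    simp only [List.tail_cons] at hc
    rcases List.mem_append.1 hc with h | h
    · left; exact List.eq_of_mem_replicate h
    · rw [pvBinStr] at h
      split at h
      · simp at h; left; exact h
      · exact pvBinDigits_chars _ c h
  · exact pvFmt36_chars addr (by omega) c (List.mem_of_mem_tail hc)

theorem pvBinDigitsF_len : ∀ (f k n : Nat), n < 2^k → (pvBinDigitsF f n).length ≤ k := by
  intro f
  induction f with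
  | zero =>
    intro k n _
    match n with
    | 0 => simp [pvBinDigitsF]
    | m+1 => simp [pvBinDigitsF]
  | succ f ih =>
    intro k n h
    match n with
    | 0 => simp [pvBinDigitsF]
    | m+1 =>
      match k with
      | 0 => norm_num at h
      | k+1 =>
        rw [pvBinDigitsF, List.length_append]
        have h2 : 2^(k+1) = 2 * 2^k := by rw [pow_succ]; ring
        have hdiv : (m+1)/2 < 2^k := by omega
        have := ih k ((m+1)/2) hdiv
        simp
        omega

theorem pvBinDigits_len : ∀ (k n : Nat), n < 2^k → (pvBinDigits n).length ≤ k :=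
  fun k n h => pvBinDigitsF_len n k n h

theorem pvFmt36_len (addr : Int) (ha : -2147483648 ≤ addr) (hb : addr ≤ 2147483648) :
    (pvFmt36 addr).length = 36 := by
  by_cases hneg : addr < 0
  · rw [pvFmt36, if_pos hneg]
    have hlt : (-addr).toNat < 2^35 := by norm_num; omega
    have hle : (pvBinStr (-addr).toNat).length ≤ 35 := by
      rw [pvBinStr]
      split
      · simp
      · exact pvBinDigits_len 35 _ hlt
    simp only [List.length_cons, List.length_append, List.length_replicate]
    omega
  · rw [pvFmt36, if_neg hneg]
    have hlt : addr.toNat < 2^36 := by norm_num; omega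
    have hle : (pvBinStr addr.toNat).length ≤ 36 := by
      rw [pvBinStr]
      split
      · simp
      · exact pvBinDigits_len 36 _ hlt
    simp only [List.length_append, List.length_replicate]
    omega

theorem pvZip_take (xs : List Char) : ∀ ys : List Char,
    xs.zip ys = xs.zip (ys.take xs.length) := by
  induction xs with
  | nil => intro ys; simp
  | cons x xs ih =>
    intro ys
    cases ys with
    | nil => simp
    | cons y ys => simp [List.zip_cons_cons, ih ys]

theorem pvIntBin_neg (s : List Char) (hne : s ≠ [])
    (hb : ∀ c ∈ s, c = '0' ∨ c = '1') :
    (pvIntBin? ('-' :: s)).getD 0 = -(pvValAcc 0 s) := by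
  match s, hne with
  | c :: rest, _ =>
    have hcond : (!(c :: rest).isEmpty && (c :: rest).all (fun c => c == '0' || c == '1')) = true := by
      simp only [List.isEmpty_cons, Bool.not_false, Bool.true_and, List.all_eq_true,
        Bool.or_eq_true, beq_iff_eq]
      exact hb
    rw [pvIntBin?, if_pos rfl, pvBinVal?, if_pos hcond]
    rfl

theorem pvValAcc_nonneg (cs : List Char) : ∀ a : Int, 0 ≤ a → 0 ≤ pvValAcc a cs := by
  induction cs with
  | nil => intro a ha; simpa [pvValAcc] using ha
  | cons c cs ih =>
    intro a ha
    rw [pvValAcc_cons]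
    exact ih _ (by unfold pvD; split <;> omega)

theorem pvValAcc_pos (cs : List Char) : ∀ a : Int, 0 < a → 0 < pvValAcc a cs := by
  induction cs with
  | nil => intro a ha; simpa [pvValAcc] using ha
  | cons c cs ih =>
    intro a ha
    rw [pvValAcc_cons]
    exact ih _ (by unfold pvD; split <;> omega)

theorem pvValAcc_pos_of_mem (cs : List Char) : ∀ a : Int, 0 ≤ a → '1' ∈ cs →
    0 < pvValAcc a cs := by
  induction cs with
  | nil => intro a _ h; simp at h
  | cons c cs ih =>
    intro a ha hm
    rw [pvValAcc_cons]
    rcases List.mem_cons.1 hm with rfl | hm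
    · exact pvValAcc_pos cs _ (by unfold pvD; norm_num; omega)
    · exact ih _ (by unfold pvD; split <;> omega) hm

theorem pvValAcc_of_all_ne1 (cs : List Char) : ∀ a : Int, (∀ c ∈ cs, c ≠ '1') →
    pvValAcc a cs = a * 2^cs.length := by
  induction cs with
  | nil => intro a _; simp [pvValAcc]
  | cons c cs ih =>
    intro a h
    rw [pvValAcc_cons, ih _ (fun d hd => h d (List.mem_cons_of_mem _ hd))]
    have hd : pvD c = 0 := by unfold pvD; rw [if_neg (h c (by simp))]
    rw [hd]
    simp [List.length_cons, pow_succ]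
    ring

theorem pvWts_pos (cs : List Char) : ∀ w ∈ pvWts cs, 0 < w := by
  induction cs with
  | nil => simp [pvWts]
  | cons c cs ih =>
    intro w hw
    rw [pvWts] at hw
    rcases List.mem_append.1 hw with h | h
    · split at h
      · simp only [List.mem_singleton] at h
        subst h
        positivity
      · simp at h
    · exact ih w h

theorem pvWts_ne_of_mem (cs : List Char) : 'X' ∈ cs → pvWts cs ≠ [] := by
  induction cs with
  | nil => simp
  | cons c cs ih =>
    intro hm
    rw [pvWts]
    rcases List.mem_cons.1 hm with rfl | hm
    · rw [if_pos rfl]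
      simp
    · intro h
      exact ih hm (List.append_eq_nil_iff.1 h).2

theorem pvWts_nil (cs : List Char) (h : ∀ c ∈ cs, c ≠ 'X') : pvWts cs = [] := by
  induction cs with
  | nil => rfl
  | cons c cs ih =>
    rw [pvWts, if_neg (h c (by simp)), List.nil_append]
    exact ih (fun d hd => h d (List.mem_cons_of_mem _ hd))

theorem pvExpand_sum_pos : ∀ (ws rs : List Int), (∀ r ∈ rs, 0 ≤ r) → (∀ w ∈ ws, 0 < w) →
    rs ≠ [] → ((∃ r ∈ rs, 0 < r) ∨ ws ≠ []) → 0 < (pvExpand rs ws).sum := by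
  intro ws
  induction ws with
  | nil =>
    intro rs h0 _ _ htrig
    rcases htrig with ⟨r, hr, hrpos⟩ | hcontra
    · calc (0:Int) < r := hrpos
        _ ≤ rs.sum := List.single_le_sum h0 r hr
    · exact absurd rfl hcontra
  | cons w ws ih =>
    intro rs h0 hw hne _
    show 0 < (pvExpand (rs.flatMap fun r => [r, r + w]) ws).sum
    obtain ⟨r0, hr0⟩ := List.exists_mem_of_ne_nil rs hne
    have hwpos : 0 < w := hw w (by simp)
    apply ih
    · intro r hr
      simp only [List.mem_flatMap] at hr
      obtain ⟨r1, hr1, hcase⟩ := hr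
      rcases List.mem_cons.1 hcase with rfl | hcase
      · exact h0 _ hr1
      · simp only [List.mem_singleton] at hcase
        subst hcase
        have := h0 _ hr1
        omega
    · exact fun w' hw' => hw w' (List.mem_cons_of_mem _ hw')
    · exact List.ne_nil_of_mem (show r0 ∈ rs.flatMap (fun r => [r, r + w]) from by
        simp only [List.mem_flatMap]
        exact ⟨r0, hr0, by simp⟩)
    · left
      refine ⟨r0 + w, by simp only [List.mem_flatMap]; exact ⟨r0, hr0, by simp⟩, ?_⟩
      have := h0 _ hr0
      omega

theorem pvSum_map_neg (l : List Int) : (l.map (fun v => -v)).sum = -(l.sum) := by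
  induction l with
  | nil => simp
  | cons x l ih => simp [ih]; ring

theorem pvBinDigitsF_zero : ∀ f : Nat, pvBinDigitsF f 0 = [] := by
  intro f
  cases f <;> rfl

theorem pvBinDigitsF_head : ∀ f n : Nat, 1 ≤ n → n ≤ f →
    ∃ t, pvBinDigitsF f n = '1' :: t := by
  intro f
  induction f with
  | zero => intro n h1 h2; omega
  | succ f ih =>
    intro n h1 h2
    match n, h1 with
    | m+1, _ =>
      rw [pvBinDigitsF]
      by_cases hm : (m+1)/2 = 0
      · have hmod : (m+1) % 2 = 1 := by omega
        rw [hm, pvBinDigitsF_zero]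
        exact ⟨[], by simp [hmod]⟩
      · obtain ⟨t, ht⟩ := ih ((m+1)/2) (by omega) (by omega)
        exact ⟨t ++ [if (m+1) % 2 == 1 then '1' else '0'], by rw [ht]; rfl⟩

theorem pvBinDigitsF_lt : ∀ f n : Nat, n ≤ f → n < 2^(pvBinDigitsF f n).length := by
  intro f
  induction f with
  | zero =>
    intro n h
    match n, h with
    | 0, _ => simp [pvBinDigitsF]
  | succ f ih =>
    intro n h
    match n with
    | 0 => simp [pvBinDigitsF]
    | m+1 =>
      rw [pvBinDigitsF, List.length_append]
      have hdiv := ih ((m+1)/2) (by omega)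
      have hp : 2^((pvBinDigitsF f ((m+1)/2)).length + 1)
          = 2 * 2^(pvBinDigitsF f ((m+1)/2)).length := by rw [pow_succ]; ring
      rw [List.length_singleton]
      omega

-- A's and B's values on the sign-threading region (addr < 0, mask starting '0'):
-- A returns the NEGATED expansions of the remaining positions, B the plain ones
theorem pvNegSplit (mask : String) (addr : Int) (rest mt : List Char)
    (hbits : pvFmt36 addr = '-' :: rest)
    (hmask : mask.toList = '0' :: mt)
    (hmt : mt ≠ [])
    (hrest_bin : ∀ c ∈ rest, c = '0' ∨ c = '1')
    (hrest_len : rest.length = 35)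
    (hmtchars : ∀ c ∈ mt.take 35, c = '0' ∨ c = '1' ∨ c = 'X') :
    mask_addr mask addr
      = (pvExpand [pvValAcc 0 ((rest.zip mt).map pvSub)] (pvWts ((rest.zip mt).map pvSub))).map (fun v => -v)
    ∧ mask_addr_alt mask addr
      = pvExpand [pvValAcc 0 ((rest.zip mt).map pvSub)] (pvWts ((rest.zip mt).map pvSub)) := by
  have hsubfun : (fun bm : Char × Char => if bm.2 ≠ '0' then bm.2 else bm.1) = pvSub := rfl
  have hzip : (pvFmt36 addr).zip mask.toList = ('-', '0') :: rest.zip mt := by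
    rw [hbits, hmask, List.zip_cons_cons]
  set cs' := (rest.zip mt).map pvSub with hcs'
  have hpmem : ∀ p ∈ rest.zip mt, (p.1 = '0' ∨ p.1 = '1') ∧ (p.2 = '0' ∨ p.2 = '1' ∨ p.2 = 'X') := by
    intro p hp
    rw [pvZip_take rest mt, hrest_len] at hp
    exact ⟨hrest_bin p.1 (List.of_mem_zip hp).1, hmtchars p.2 (List.of_mem_zip hp).2⟩
  have hcschars : ∀ c ∈ cs', c = '0' ∨ c = '1' ∨ c = 'X' := by
    intro c hc
    rw [hcs'] at hc
    obtain ⟨p, hp, rfl⟩ := List.mem_map.1 hc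
    obtain ⟨h1, h2⟩ := hpmem p hp
    rw [pvSub]
    split
    · exact h2
    · rcases h1 with h | h
      · exact Or.inl h
      · exact Or.inr (Or.inl h)
  have hcsne : cs' ≠ [] := by
    rw [hcs']
    simp only [ne_eq, List.map_eq_nil_iff, List.zip_eq_nil_iff]
    intro hor
    rcases hor with h | h
    · rw [h] at hrest_len
      simp at hrest_len
    · exact hmt h
  constructor
  · -- A side
    unfold mask_addr
    simp only []
    rw [hsubfun, hzip, List.map_cons]
    have hsub0 : pvSub ('-', '0') = '-' := by decide
    rw [hsub0, ← hcs']
    have hdfs : pvDfs ('-' :: cs') = (pvDfs cs').map (fun b => '-' :: b) := by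
      simp [pvDfs]
    rw [hdfs, List.map_map]
    have hcongr : ∀ s ∈ pvDfs cs',
        ((fun n => (pvIntBin? n).getD 0) ∘ fun b => '-' :: b) s = -(pvValAcc 0 s) := by
      intro s hs
      obtain ⟨hslen, hsbin⟩ := pvDfs_shape cs' hcschars s hs
      have hsne : s ≠ [] := by
        intro h
        apply hcsne
        rw [h] at hslen
        exact List.eq_nil_of_length_eq_zero hslen.symm
      simpa [Function.comp] using pvIntBin_neg s hsne hsbin
    rw [List.map_congr_left hcongr]
    have hmm : (pvDfs cs').map (fun s => -(pvValAcc 0 s))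
        = ((pvDfs cs').map (pvValAcc 0)).map (fun v => -v) := by
      rw [List.map_map]
      rfl
    rw [hmm, pvDfs_map cs' 0, pvE_expand cs' 0]
  · -- B side
    unfold mask_addr_alt
    simp only []
    rw [hzip, List.foldl_cons]
    have hstep : (if (('-', '0') : Char × Char).2 = 'X' then
          (2 * ((0:Int), ([]:List Int)).1, ((0:Int), ([]:List Int)).2.map (fun w => 2 * w) ++ [1])
        else
          (2 * ((0:Int), ([]:List Int)).1 +
             (if (('-', '0') : Char × Char).2 = '1' then 1
              else if (('-', '0') : Char × Char).2 = '0' then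
                (if (('-', '0') : Char × Char).1 = '1' then 1 else 0) else 0),
           ((0:Int), ([]:List Int)).2.map (fun w => 2 * w)))
        = ((0:Int), ([]:List Int)) := by decide
    rw [hstep, pvFoldB (rest.zip mt) 0 []
      (fun p hp => ⟨fun _ => (hpmem p hp).1, (hpmem p hp).2⟩)]
    simp only [List.map_nil, List.nil_append]
    rfl

theorem pvCore (mask : String) (addr : Int)
    (hm : mask ≠ "")
    (hlen : (pvFmt36 addr).length = 36)
    (hkey : ∀ p ∈ (pvFmt36 addr).zip mask.toList,
      (p.2 = '0' → p.1 = '0' ∨ p.1 = '1') ∧ (p.2 = '0' ∨ p.2 = '1' ∨ p.2 = 'X')) :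
    mask_addr mask addr = mask_addr_alt mask addr := by
  unfold mask_addr mask_addr_alt
  simp only []
  set bits := pvFmt36 addr with hbdef
  set ps := bits.zip mask.toList with hpsdef
  have hsubfun : (fun bm : Char × Char => if bm.2 ≠ '0' then bm.2 else bm.1) = pvSub := rfl
  rw [hsubfun]
  set cs := ps.map pvSub with hcsdef
  have hcschars : ∀ c ∈ cs, c = '0' ∨ c = '1' ∨ c = 'X' := by
    intro c hc
    rw [hcsdef] at hc
    obtain ⟨p, hp, rfl⟩ := List.mem_map.1 hc
    obtain ⟨h1, h2⟩ := hkey p hp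
    rw [pvSub]
    split
    · exact h2
    · rename_i hne
      rcases h1 (by simpa using hne) with h | h
      · exact Or.inl h
      · exact Or.inr (Or.inl h)
  have hml : mask.toList ≠ [] := by
    intro h
    exact hm (String.toList_eq_nil_iff.mp h)
  have hcsne : cs ≠ [] := by
    rw [hcsdef, hpsdef]
    simp only [ne_eq, List.map_eq_nil_iff, List.zip_eq_nil_iff]
    intro hor
    rcases hor with h | h
    · rw [h] at hlen
      simp at hlen
    · exact hml h
  have hA : (pvDfs cs).map (fun n => (pvIntBin? n).getD 0) = (pvDfs cs).map (pvValAcc 0) := by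
    apply List.map_congr_left
    intro s hs
    obtain ⟨hslen, hsbin⟩ := pvDfs_shape cs hcschars s hs
    have hsne : s ≠ [] := by
      intro h
      apply hcsne
      rw [h] at hslen
      exact List.eq_nil_of_length_eq_zero hslen.symm
    exact pvIntBin_getD s hsne hsbin
  rw [hA, pvDfs_map cs 0, pvE_expand cs 0]
  rw [pvFoldB ps 0 [] hkey]
  simp only [List.map_nil, List.nil_append]
  rfl

-- shared setup for the sign-threading region: decompose mask and the formatted address
-- (a conjunction of facts consumed by both the degenerate-equality case and the tightness proof)
theorem pvNegSetup (mask : String) (addr : Int)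
    (hml : mask.toList ≠ [])
    (hbounds : -2147483648 ≤ addr ∧ addr ≤ 2147483648)
    (hneg : addr < 0)
    (htake1 : mask.toList.take 1 = ['0'])
    (hnot00 : ¬(addr < 0 ∧ mask = "0")) :
    ∃ mt : List Char,
      mask.toList = '0' :: mt ∧ mt ≠ [] ∧
      1 ≤ (-addr).toNat ∧ (-addr).toNat < 2^35 ∧
      pvBinStr (-addr).toNat = pvBinDigits (-addr).toNat ∧
      (pvBinStr (-addr).toNat).length ≤ 35 ∧
      pvFmt36 addr
        = '-' :: (List.replicate (35 - (pvBinStr (-addr).toNat).length) '0' ++ pvBinStr (-addr).toNat) ∧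
      mask.toList.take 36 = '0' :: mt.take 35 := by
  obtain ⟨m0, mt, hmt⟩ : ∃ m0 mt, mask.toList = m0 :: mt := by
    cases h : mask.toList with
    | nil => exact absurd h hml
    | cons a l => exact ⟨a, l, rfl⟩
  have hm0 : m0 = '0' := by
    rw [hmt] at htake1
    simpa using htake1
  subst hm0
  refine ⟨mt, hmt, ?_, by omega, by norm_num; omega, ?_, ?_, ?_, ?_⟩
  · intro h
    apply hnot00
    refine ⟨hneg, ?_⟩
    apply String.toList_inj.mp
    rw [hmt, h]
    rfl
  · rw [pvBinStr, if_neg (by omega)]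
  · have hlt : (-addr).toNat < 2^35 := by norm_num; omega
    rw [pvBinStr, if_neg (by omega)]
    exact pvBinDigits_len 35 _ hlt
  · simp only [pvFmt36, if_pos hneg]
  · rw [hmt, show (36:Nat) = 35+1 from rfl, List.take_succ_cons]

-- ===== VERDICT (by name: the statements are the Claim_ definitions above) =====
theorem mask_addr_spec : Claim_unchanged_mask_addr := by
  intro mask addr hdom hpre
  obtain ⟨hm, hcharsB, hnot00⟩ := hpre
  have hchars : ∀ c ∈ mask.toList.take 36, c = '0' ∨ c = '1' ∨ c = 'X' := by
    simp only [List.all_eq_true, Bool.or_eq_true, beq_iff_eq] at hcharsB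
    intro c hc
    rcases hcharsB c hc with h | h
    · rcases h with h | h
      · exact Or.inl h
      · exact Or.inr (Or.inl h)
    · exact Or.inr (Or.inr h)
  have hbounds : -2147483648 ≤ addr ∧ addr ≤ 2147483648 := by
    simp only [Dom_mask_addr, Bool.and_eq_true, pvDomInt, decide_eq_true_eq] at hdom
    exact hdom.2
  have hlen : (pvFmt36 addr).length = 36 := pvFmt36_len addr hbounds.1 hbounds.2
  have hml : mask.toList ≠ [] := fun h => hm (String.toList_eq_nil_iff.mp h)
  intro hnd
  by_cases hng : addr < 0 ∧ mask.toList.take 1 = ['0']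
  · -- all ¬D_ inputs here are the degenerate case: both sides return [0]
    obtain ⟨hneg, htake1⟩ := hng
    have hthird : ((mask.toList.take 36).all (fun c => c == '0')) = true ∧
        -addr < 2^(36 - min 36 mask.toList.length) := by
      by_contra h
      exact hnd ⟨hneg, htake1, h⟩
    obtain ⟨hall, hsmall⟩ := hthird
    obtain ⟨mt, hmt, hmtne, hn1, hn35, hsbd, hslen35, hbits, htake36⟩ :=
      pvNegSetup mask addr hml hbounds hneg htake1 hnot00
    have hmtchars : ∀ c ∈ mt.take 35, c = '0' ∨ c = '1' ∨ c = 'X' := by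
      intro c hc
      exact hchars c (by rw [htake36]; exact List.mem_cons_of_mem _ hc)
    set s := pvBinStr (-addr).toNat with hs
    set rest := List.replicate (35 - s.length) '0' ++ s with hrest
    have hrestlen : rest.length = 35 := by
      rw [hrest]
      simp only [List.length_append, List.length_replicate]
      omega
    have hrestbin : ∀ c ∈ rest, c = '0' ∨ c = '1' := by
      intro c hc
      rw [hrest] at hc
      rcases List.mem_append.1 hc with h | h
      · left
        exact List.eq_of_mem_replicate h
      · rw [hsbd] at h
        exact pvBinDigits_chars _ c h
    obtain ⟨hA, hB⟩ := pvNegSplit mask addr rest mt hbits hmt hmtne hrestbin hrestlen hmtchars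
    set cs' := (rest.zip mt).map pvSub with hcs'
    have hallP : ∀ x ∈ mask.toList.take 36, x = '0' := by
      simp only [List.all_eq_true, beq_iff_eq] at hall
      exact hall
    have hLsmall : s.length ≤ 36 - min 36 mask.toList.length := by
      have hcast : -addr < ((2^(36 - min 36 mask.toList.length) : Nat) : Int) := by
        rw [Nat.cast_pow]
        exact_mod_cast hsmall
      have hnn : (-addr).toNat < 2^(36 - min 36 mask.toList.length) := by omega
      rw [hsbd]
      exact pvBinDigits_len _ _ hnn
    have hcs0 : ∀ c ∈ cs', c = '0' := by
      intro c hc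
      rw [hcs'] at hc
      obtain ⟨p, hp, rfl⟩ := List.mem_map.1 hc
      obtain ⟨j, hj, hpj⟩ := List.mem_iff_getElem.1 hp
      rw [List.length_zip, hrestlen] at hj
      have hjr : j < rest.length := by omega
      have hjm : j < mt.length := by omega
      rw [List.getElem_zip] at hpj
      subst hpj
      have hmtj : mt[j] = '0' := by
        apply hallP
        rw [htake36]
        refine List.mem_cons_of_mem _ ?_
        have he : (mt.take 35)[j]'(by simp only [List.length_take]; omega) = mt[j] :=
          List.getElem_take
        rw [← he]
        exact List.getElem_mem _
      have hsubj : pvSub (rest[j], mt[j]) = rest[j] := by simp [pvSub, hmtj]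
      rw [hsubj]
      have hL : min 35 mt.length = min 36 mask.toList.length - 1 := by
        rw [hmt]
        simp only [List.length_cons]
        omega
      have hjlt : j < 35 - s.length := by omega
      have e1 : rest[j]'hjr = (List.replicate (35 - s.length) '0' ++ s)[j]'(by
          rw [← hrest]; exact hjr) := List.getElem_of_eq hrest hjr
      rw [e1, List.getElem_append_left (by simp only [List.length_replicate]; omega)]
      simp
    rw [hA, hB, pvWts_nil cs' (fun c hc => by rw [hcs0 c hc]; decide),
      pvValAcc_of_all_ne1 cs' 0 (fun c hc => by rw [hcs0 c hc]; decide)]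
    simp [pvExpand]
  · -- main path: A = B via pvCore
    have hkey : ∀ p ∈ (pvFmt36 addr).zip mask.toList,
        (p.2 = '0' → p.1 = '0' ∨ p.1 = '1') ∧ (p.2 = '0' ∨ p.2 = '1' ∨ p.2 = 'X') := by
      intro p hp
      obtain ⟨i, hi, hpi⟩ := List.mem_iff_getElem.1 hp
      rw [List.length_zip] at hi
      have hib : i < (pvFmt36 addr).length := by omega
      have him : i < mask.toList.length := by omega
      rw [List.getElem_zip] at hpi
      subst hpi
      constructor
      · intro h0
        by_cases hneg : addr < 0
        · have hi0 : i ≠ 0 := by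
            intro h
            subst h
            apply hng
            refine ⟨hneg, ?_⟩
            have h0' : mask.toList[0]'him = '0' := by simpa using h0
            have hh : mask.toList.head? = some '0' := by
              rw [List.head?_eq_getElem?, List.getElem?_eq_getElem him, h0']
            rw [List.take_one, hh]
            rfl
          obtain ⟨j, rfl⟩ : ∃ j, i = j + 1 := ⟨i - 1, by omega⟩
          have hjt : j < (pvFmt36 addr).tail.length := by
            simp only [List.length_tail]
            omega
          have hgt : (pvFmt36 addr)[j+1]'hib = (pvFmt36 addr).tail[j]'hjt :=
            (List.getElem_tail hjt).symm
          rw [hgt]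
          exact pvFmt36_tail_chars addr _ (List.getElem_mem _)
        · exact pvFmt36_chars addr (by omega) _ (List.getElem_mem _)
      · have h36 : i < 36 := by omega
        have : mask.toList[i] = (mask.toList.take 36)[i]'(by rw [List.length_take]; omega) := by
          rw [List.getElem_take]
        rw [this]
        exact hchars _ (List.getElem_mem _)
    exact pvCore mask addr hm hlen hkey

theorem mask_addr_changed : Claim_changed_mask_addr := by
  unfold Claim_changed_mask_addr
  decide

theorem mask_addr_tight : Claim_exact_mask_addr := by
  intro mask addr hdom hpre hd
  obtain ⟨hm, hcharsB, hnot00⟩ := hpre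
  obtain ⟨hneg, htake1, hne0⟩ := hd
  have hchars : ∀ c ∈ mask.toList.take 36, c = '0' ∨ c = '1' ∨ c = 'X' := by
    simp only [List.all_eq_true, Bool.or_eq_true, beq_iff_eq] at hcharsB
    intro c hc
    rcases hcharsB c hc with h | h
    · rcases h with h | h
      · exact Or.inl h
      · exact Or.inr (Or.inl h)
    · exact Or.inr (Or.inr h)
  have hbounds : -2147483648 ≤ addr ∧ addr ≤ 2147483648 := by
    simp only [Dom_mask_addr, Bool.and_eq_true, pvDomInt, decide_eq_true_eq] at hdom
    exact hdom.2
  have hml : mask.toList ≠ [] := fun h => hm (String.toList_eq_nil_iff.mp h)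
  obtain ⟨mt, hmt, hmtne, hn1, hn35, hsbd, hslen35, hbits, htake36⟩ :=
    pvNegSetup mask addr hml hbounds hneg htake1 hnot00
  have hmtchars : ∀ c ∈ mt.take 35, c = '0' ∨ c = '1' ∨ c = 'X' := by
    intro c hc
    exact hchars c (by rw [htake36]; exact List.mem_cons_of_mem _ hc)
  set s := pvBinStr (-addr).toNat with hs
  set rest := List.replicate (35 - s.length) '0' ++ s with hrest
  have hrestlen : rest.length = 35 := by
    rw [hrest]
    simp only [List.length_append, List.length_replicate]
    omega
  have hrestbin : ∀ c ∈ rest, c = '0' ∨ c = '1' := by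
    intro c hc
    rw [hrest] at hc
    rcases List.mem_append.1 hc with h | h
    · left
      exact List.eq_of_mem_replicate h
    · rw [hsbd] at h
      exact pvBinDigits_chars _ c h
  obtain ⟨hA, hB⟩ := pvNegSplit mask addr rest mt hbits hmt hmtne hrestbin hrestlen hmtchars
  set cs' := (rest.zip mt).map pvSub with hcs'
  have hL : min 35 mt.length = min 36 mask.toList.length - 1 := by
    rw [hmt]
    simp only [List.length_cons]
    omega
  have htrig : 0 < pvValAcc 0 cs' ∨ pvWts cs' ≠ [] := by
    by_cases hall : ((mask.toList.take 36).all (fun c => c == '0')) = true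
    · -- every used mask bit is '0': a '1' of the address itself survives into cs'
      have hallP : ∀ x ∈ mask.toList.take 36, x = '0' := by
        simp only [List.all_eq_true, beq_iff_eq] at hall
        exact hall
      have hsmall' : ¬(-addr < 2^(36 - min 36 mask.toList.length)) := fun h => hne0 ⟨hall, h⟩
      have hslen_gt : 36 - min 36 mask.toList.length < s.length := by
        by_contra hle
        push_neg at hle
        apply hsmall'
        have hlt : (-addr).toNat < 2^s.length := by
          rw [hsbd, pvBinDigits]
          exact pvBinDigitsF_lt _ _ le_rfl
        have hmono : (2:Nat)^s.length ≤ 2^(36 - min 36 mask.toList.length) :=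
          Nat.pow_le_pow_right (by norm_num) hle
        have : (-addr).toNat < 2^(36 - min 36 mask.toList.length) := lt_of_lt_of_le hlt hmono
        have hcast : ((2^(36 - min 36 mask.toList.length) : Nat) : Int)
            = 2^(36 - min 36 mask.toList.length) := by push_cast; ring
        omega
      obtain ⟨t, ht⟩ : ∃ t, s = '1' :: t := by
        rw [hsbd, pvBinDigits]
        exact pvBinDigitsF_head _ _ hn1 le_rfl
      have h1mem : '1' ∈ cs' := by
        have hkm : 35 - s.length < mt.length := by omega
        have hkr : 35 - s.length < rest.length := by omega
        have hkz : 35 - s.length < (rest.zip mt).length := by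
          rw [List.length_zip, hrestlen]
          omega
        have hrestk : rest[35 - s.length]'hkr = '1' := by
          have e1 : rest[35 - s.length]'hkr
              = (List.replicate (35 - s.length) '0' ++ s)[35 - s.length]'(by
                  rw [← hrest]; exact hkr) := List.getElem_of_eq hrest hkr
          rw [e1, List.getElem_append_right (by simp only [List.length_replicate]; omega)]
          simp [ht]
        have hmtk : mt[35 - s.length] = '0' := by
          apply hallP
          rw [htake36]
          refine List.mem_cons_of_mem _ ?_
          have he : (mt.take 35)[35 - s.length]'(by simp only [List.length_take]; omega)
              = mt[35 - s.length] := List.getElem_take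
          rw [← he]
          exact List.getElem_mem _
        refine List.mem_map.2 ⟨(rest[35 - s.length]'hkr, mt[35 - s.length]'hkm), ?_, ?_⟩
        · refine List.mem_iff_getElem.2 ⟨35 - s.length, hkz, ?_⟩
          rw [List.getElem_zip]
        · simp [pvSub, hmtk, hrestk]
      exact Or.inl (pvValAcc_pos_of_mem cs' 0 le_rfl h1mem)
    · -- some used mask character is '1' or 'X'
      obtain ⟨c, hcmem, hcne⟩ : ∃ c ∈ mask.toList.take 36, c ≠ '0' := by
        by_contra hcon
        push_neg at hcon
        apply hall
        rw [List.all_eq_true]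
        intro x hx
        simpa using hcon x hx
      have hcmt : c ∈ mt.take 35 := by
        rw [htake36] at hcmem
        rcases List.mem_cons.1 hcmem with rfl | h
        · exact absurd rfl hcne
        · exact h
      obtain ⟨j, hj, hcj⟩ := List.mem_iff_getElem.1 hcmt
      have hjm : j < mt.length := by
        simp only [List.length_take] at hj
        omega
      have hjr : j < rest.length := by
        simp only [List.length_take] at hj
        omega
      have hmtj : mt[j]'hjm = c := by
        have he : (mt.take 35)[j]'hj = mt[j]'hjm := List.getElem_take
        rw [← he]
        exact hcj
      have hmem : pvSub (rest[j]'hjr, mt[j]'hjm) ∈ cs' := by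
        refine List.mem_map.2 ⟨(rest[j]'hjr, mt[j]'hjm), ?_, rfl⟩
        refine List.mem_iff_getElem.2 ⟨j, by rw [List.length_zip, hrestlen]; omega, ?_⟩
        rw [List.getElem_zip]
      have hsubj : pvSub (rest[j]'hjr, mt[j]'hjm) = c := by
        simp [pvSub, hmtj, hcne]
      rw [hsubj] at hmem
      rcases hchars c hcmem with h0 | h1 | hX
      · exact absurd h0 hcne
      · left
        apply pvValAcc_pos_of_mem cs' 0 le_rfl
        rw [← h1]
        exact hmem
      · right
        apply pvWts_ne_of_mem
        rw [← hX]
        exact hmem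
  rw [hA, hB]
  intro heq
  have hsum := congrArg List.sum heq
  rw [pvSum_map_neg] at hsum
  have hpos : 0 < (pvExpand [pvValAcc 0 cs'] (pvWts cs')).sum := by
    apply pvExpand_sum_pos
    · intro r hr
      simp only [List.mem_singleton] at hr
      subst hr
      exact pvValAcc_nonneg cs' 0 le_rfl
    · exact pvWts_pos cs'
    · simp
    · rcases htrig with h | h
      · exact Or.inl ⟨_, by simp, h⟩
      · exact Or.inr h
  omega
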